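-- pv_equiv track=rewrite | github.com/ADRIE-A3/RTE | test.py | make_externalconditional_vectors
-- ===== SOURCE A (Python) =====
-- def make_externalconditional_vectors(xn, sn, zn, tn, un, yn, m, l ):
--     N = len(xn)
--     assert N == len(yn) == len(sn)== len(zn)== len(tn)== len(un), 'all timeseries should have same length'
--     ml = max(m,l)
--     xnms = []
--     for i in range(m):
--         xnms.append(sn[ml-1 - i:N-1 - i])
--         xnms.append(zn[ml-1 - i:N-1 - i])
--         xnms.append(tn[ml-1 - i:N -1 - i])
--         xnms.append(un[ml -1 - i:N-1 - i])
--
--     xm = list(zip(*xnms))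
--
--     for i in range(1):
--         xnms.append(xn[ml - i:N - i])
--
--     xn1_xm = list(zip(*xnms))
--
--     xnynms = []
--     for i in range(m):
--         xnynms.append(sn[ml-1 - i:N-1 - i])
--         xnynms.append(zn[ml-1 - i:N-1 - i])
--         xnynms.append(tn[ml-1 - i:N -1 - i])
--         xnynms.append(un[ml -1 - i:N-1 - i])
--     for i in range(l):
--         xnynms.append(yn[ml - 1 - i:N - 1 - i])
--
--     xm_yl = list(zip(*xnynms))
--
--     for i in range(1):
--         xnynms.append(xn[ml - i:N - i])
--
--     xn1_xm_yl= list(zip(*xnynms))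
--
--
--     return (xn1_xm_yl, xm_yl, xn1_xm, xm)
-- ===== SOURCE B (Python) =====
-- def make_externalconditional_vectors(xn, sn, zn, tn, un, yn, m, l):
--     N = len(xn)
--     assert N == len(yn) == len(sn) == len(zn) == len(tn) == len(un), 'all timeseries should have same length'
--     ml = max(m, l)
--     rows = range(max(0, N - ml))
--
--     def base(r):
--         row = []
--         for i in range(m):
--             j = ml - 1 - i + r
--             row += [sn[j], zn[j], tn[j], un[j]]
--         return row
--
--     def ytail(r):
--         return [yn[ml - 1 - i + r] for i in range(l)]
--
--     # zip(*[]) is empty: a group with no columns at all yields [], not empty rows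
--     xm = [tuple(base(r)) for r in rows] if m > 0 else []
--     xm_yl = [tuple(base(r) + ytail(r)) for r in rows] if max(m, l) > 0 else []
--     xn1_xm = [tuple(base(r) + [xn[ml + r]]) for r in rows]
--     xn1_xm_yl = [tuple(base(r) + ytail(r) + [xn[ml + r]]) for r in rows]
--     return (xn1_xm_yl, xm_yl, xn1_xm, xm)
-- ===== Notes on version B (the rewrite author's own statement) =====
-- stated objective: alternative
-- what changed: B builds each output row directly in row-major order (rows = max(0, N-max(m,l)), indexing the series at ml-1-i+r), instead of A's column-major construction of lagged slice lists transposed with zip(*...).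
-- outside the precondition, e.g. on make_externalconditional_vectors([], [], [], [], [], [], -1, -1): A returns ([], [], [], []), B raises IndexError
import Mathlib
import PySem

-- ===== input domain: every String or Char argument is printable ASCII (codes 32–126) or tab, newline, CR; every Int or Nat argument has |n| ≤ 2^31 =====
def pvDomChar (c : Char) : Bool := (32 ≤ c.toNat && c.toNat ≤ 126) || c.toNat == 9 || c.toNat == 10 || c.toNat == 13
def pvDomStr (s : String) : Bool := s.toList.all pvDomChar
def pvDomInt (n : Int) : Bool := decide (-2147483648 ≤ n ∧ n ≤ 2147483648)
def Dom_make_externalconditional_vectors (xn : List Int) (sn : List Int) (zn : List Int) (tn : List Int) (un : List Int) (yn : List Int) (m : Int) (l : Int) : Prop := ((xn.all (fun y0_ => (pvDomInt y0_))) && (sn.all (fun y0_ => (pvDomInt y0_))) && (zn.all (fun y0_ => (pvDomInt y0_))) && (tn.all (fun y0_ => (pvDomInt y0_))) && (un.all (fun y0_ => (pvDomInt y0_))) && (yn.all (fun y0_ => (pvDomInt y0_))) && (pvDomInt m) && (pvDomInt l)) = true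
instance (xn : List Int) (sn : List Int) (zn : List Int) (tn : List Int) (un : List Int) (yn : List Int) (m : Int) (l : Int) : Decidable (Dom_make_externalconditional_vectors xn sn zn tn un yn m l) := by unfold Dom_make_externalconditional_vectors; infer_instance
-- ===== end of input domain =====

-- B computes the output row-by-row (row-major) instead of building column slice-lists and
-- transposing with zip; equivalence of the two decompositions is proved on equal-length series
-- with nonnegative lag counts.

-- ===== PORT A =====
-- Python's zip(*cols) on lists of ints: truncating transpose; zip(*[]) = [].
def pyZipCols : List Int → List (List Int) → List (List Int)
  | [], _ => []
  | a :: as, cs =>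
    if cs.any (·.isEmpty) then []
    else (a :: cs.map (·.headD 0)) :: pyZipCols as (cs.map (·.tail))

def pyZipStar : List (List Int) → List (List Int)
  | [] => []
  | c :: cs => pyZipCols c cs

def make_externalconditional_vectors (xn : List Int) (sn : List Int) (zn : List Int) (tn : List Int) (un : List Int) (yn : List Int) (m : Int) (l : Int) : List (List Int) × List (List Int) × List (List Int) × List (List Int) :=
  let N : Int := xn.length
  let ml := max m l
  let xnms := (PySem.List.pyRange 0 m 1).foldl (fun acc i =>
      acc ++ [PySem.List.slice sn (some (ml - 1 - i)) (some (N - 1 - i)),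
              PySem.List.slice zn (some (ml - 1 - i)) (some (N - 1 - i)),
              PySem.List.slice tn (some (ml - 1 - i)) (some (N - 1 - i)),
              PySem.List.slice un (some (ml - 1 - i)) (some (N - 1 - i))]) []
  let xm := pyZipStar xnms
  let xnms := (PySem.List.pyRange 0 1 1).foldl (fun acc i =>
      acc ++ [PySem.List.slice xn (some (ml - i)) (some (N - i))]) xnms
  let xn1_xm := pyZipStar xnms
  let xnynms := (PySem.List.pyRange 0 m 1).foldl (fun acc i =>
      acc ++ [PySem.List.slice sn (some (ml - 1 - i)) (some (N - 1 - i)),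
              PySem.List.slice zn (some (ml - 1 - i)) (some (N - 1 - i)),
              PySem.List.slice tn (some (ml - 1 - i)) (some (N - 1 - i)),
              PySem.List.slice un (some (ml - 1 - i)) (some (N - 1 - i))]) []
  let xnynms := (PySem.List.pyRange 0 l 1).foldl (fun acc i =>
      acc ++ [PySem.List.slice yn (some (ml - 1 - i)) (some (N - 1 - i))]) xnynms
  let xm_yl := pyZipStar xnynms
  let xnynms := (PySem.List.pyRange 0 1 1).foldl (fun acc i =>
      acc ++ [PySem.List.slice xn (some (ml - i)) (some (N - i))]) xnynms
  let xn1_xm_yl := pyZipStar xnynms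
  (xn1_xm_yl, xm_yl, xn1_xm, xm)

-- ===== PORT B =====
def make_externalconditional_vectors_alt (xn : List Int) (sn : List Int) (zn : List Int) (tn : List Int) (un : List Int) (yn : List Int) (m : Int) (l : Int) : List (List Int) × List (List Int) × List (List Int) × List (List Int) :=
  let N : Int := xn.length
  let ml := max m l
  let rows := PySem.List.pyRange 0 (max 0 (N - ml)) 1
  let base := fun (r : Int) => (PySem.List.pyRange 0 m 1).foldl (fun row i =>
      let j := ml - 1 - i + r
      row ++ [PySem.List.pyGetD sn j 0, PySem.List.pyGetD zn j 0,
              PySem.List.pyGetD tn j 0, PySem.List.pyGetD un j 0]) []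
  let ytail := fun (r : Int) => (PySem.List.pyRange 0 l 1).map (fun i => PySem.List.pyGetD yn (ml - 1 - i + r) 0)
  let xm := if m > 0 then rows.map (fun r => base r) else []
  let xm_yl := if max m l > 0 then rows.map (fun r => base r ++ ytail r) else []
  let xn1_xm := rows.map (fun r => base r ++ [PySem.List.pyGetD xn (ml + r) 0])
  let xn1_xm_yl := rows.map (fun r => base r ++ ytail r ++ [PySem.List.pyGetD xn (ml + r) 0])
  (xn1_xm_yl, xm_yl, xn1_xm, xm)

-- ===== PRECONDITION & SPEC =====
-- Pre_ excludes inputs of unequal lengths (A's assert raises there) and negative lag counts m, l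
-- (outside the natural domain of lag counts: A's value there is a negative-slice wraparound artefact).
def Pre_make_externalconditional_vectors (xn : List Int) (sn : List Int) (zn : List Int) (tn : List Int) (un : List Int) (yn : List Int) (m : Int) (l : Int) : Prop :=
  xn.length = yn.length ∧ xn.length = sn.length ∧ xn.length = zn.length ∧
  xn.length = tn.length ∧ xn.length = un.length ∧ 0 ≤ m ∧ 0 ≤ l
instance (xn : List Int) (sn : List Int) (zn : List Int) (tn : List Int) (un : List Int) (yn : List Int) (m : Int) (l : Int) : Decidable (Pre_make_externalconditional_vectors xn sn zn tn un yn m l) := by unfold Pre_make_externalconditional_vectors; infer_instance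

def pvWitness_make_externalconditional_vectors : List Int × List Int × List Int × List Int × List Int × List Int × Int × Int :=
  ([1, 2, 3, 4], [5, 6, 7, 8], [9, 10, 11, 12], [13, 14, 15, 16], [17, 18, 19, 20], [21, 22, 23, 24], 2, 1)

def Spec_make_externalconditional_vectors (xn : List Int) (sn : List Int) (zn : List Int) (tn : List Int) (un : List Int) (yn : List Int) (m : Int) (l : Int) (out : List (List Int) × List (List Int) × List (List Int) × List (List Int)) : Prop := out = make_externalconditional_vectors_alt xn sn zn tn un yn m l
instance (xn : List Int) (sn : List Int) (zn : List Int) (tn : List Int) (un : List Int) (yn : List Int) (m : Int) (l : Int) (out : List (List Int) × List (List Int) × List (List Int) × List (List Int)) : Decidable (Spec_make_externalconditional_vectors xn sn zn tn un yn m l out) := by unfold Spec_make_externalconditional_vectors; infer_instance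

-- ===== CLAIM (what is proved, stated in full; the proofs are below) =====
def Claim_equal_make_externalconditional_vectors : Prop := ∀ (xn : List Int) (sn : List Int) (zn : List Int) (tn : List Int) (un : List Int) (yn : List Int) (m : Int) (l : Int), Dom_make_externalconditional_vectors xn sn zn tn un yn m l → Pre_make_externalconditional_vectors xn sn zn tn un yn m l → Spec_make_externalconditional_vectors xn sn zn tn un yn m l (make_externalconditional_vectors xn sn zn tn un yn m l)

-- ===== LEMMAS AND PROOFS =====

lemma getD_succ (col : List Int) (r : Nat) : col.getD (r+1) 0 = col.tail.getD r 0 := by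
  cases col <;> simp [List.getD]

-- zip of a column list containing an empty column is empty
lemma pyZipStar_of_mem_nil {c : List Int} {cs : List (List Int)} (h : [] ∈ c :: cs) :
    pyZipStar (c :: cs) = [] := by
  cases c with
  | nil => rfl
  | cons a as =>
    have hcs : [] ∈ cs := by simpa using h
    simp only [pyZipStar, pyZipCols]
    rw [if_pos]
    exact List.any_eq_true.mpr ⟨[], hcs, by simp⟩

-- zip of equal-length columns is the row-major transpose
lemma pyZipCols_eq_rows : ∀ (c : List Int) (cs : List (List Int)) (n : Nat),
    c.length = n → (∀ x ∈ cs, x.length = n) →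
    pyZipCols c cs = (List.range n).map (fun r => (c :: cs).map (fun col => col.getD r 0)) := by
  intro c
  induction c with
  | nil =>
    intro cs n hc _
    simp [pyZipCols, ← hc]
  | cons a as ih =>
    intro cs n hc hcs
    obtain ⟨k, rfl⟩ : ∃ k, n = k + 1 := ⟨as.length, by simpa using hc.symm⟩
    have hk : as.length = k := by simpa using hc
    have hany : cs.any (·.isEmpty) = false := by
      simp only [List.any_eq_false]
      intro x hx
      have := hcs x hx
      simp [List.isEmpty_iff, ← List.length_eq_zero_iff]
      omega
    simp only [pyZipCols, hany, Bool.false_eq_true, if_false]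
    rw [ih (cs.map (·.tail)) k (by simpa using hk) (by
      intro x hx
      simp only [List.mem_map] at hx
      obtain ⟨y, hy, rfl⟩ := hx
      have := hcs y hy
      simp [List.length_tail]; omega)]
    rw [List.range_succ_eq_map]
    simp only [List.map_cons, List.map_map]
    refine List.cons_eq_cons.mpr ⟨?_, ?_⟩
    · simp only [List.getD]
      refine congrArg₂ _ rfl (List.map_congr_left ?_)
      intro col _
      cases col <;> rfl
    · apply List.map_congr_left
      intro r _
      simp only [Function.comp_apply]
      refine List.cons_eq_cons.mpr ⟨?_, ?_⟩
      · simp [List.getD]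
      · apply List.map_congr_left
        intro col _
        simp only [Function.comp_apply]
        exact (getD_succ col r).symm

lemma slice_getD (a : List Int) (s e : Int) (r : Nat) (hs : 0 ≤ s) (he : 0 ≤ e)
    (hr : s + r < e) (hlen : e ≤ a.length) :
    (PySem.List.slice a (some s) (some e)).getD r 0 = PySem.List.pyGetD a (s + r) 0 := by
  rw [PySem.List.slice_toNat a hs he,
    PySem.List.pyGetD_eq_getElem a 0 (by omega) (lt_of_lt_of_le hr hlen)]
  have h1 : (s + (r:Int)).toNat = s.toNat + r := by omega
  have h2 : s.toNat + r < a.length := by omega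
  rw [List.getD_eq_getElem _ _ (by simp [List.length_take, List.length_drop]; omega)]
  simp [h1, List.getElem_take, List.getElem_drop]

lemma slice_length_eq (a : List Int) (s e : Int) (hs : 0 ≤ s) (hse : s ≤ e)
    (hlen : e ≤ a.length) :
    (PySem.List.slice a (some s) (some e)).length = (e - s).toNat := by
  rw [PySem.List.slice_toNat a hs (le_trans hs hse)]
  simp [List.length_take, List.length_drop]; omega

lemma slice_eq_nil (a : List Int) (s e : Int) (hs : 0 ≤ s) (he : 0 ≤ e) (hes : e ≤ s) :
    PySem.List.slice a (some s) (some e) = [] := by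
  rw [PySem.List.slice_toNat a hs he]
  have : e.toNat - s.toNat = 0 := by omega
  simp [this]

lemma slice_of_nil (s e : Int) : PySem.List.slice ([] : List Int) (some s) (some e) = [] := by
  have h1 := PySem.List.length_slice ([] : List Int) s e
  have h2 := PySem.List.clampIdx_le ([] : List Int).length e
  exact List.eq_nil_of_length_eq_zero (by simp only [List.length_nil] at h1 h2; omega)

lemma flatMap_congr_mem {α β : Type} {l : List α} {f g : α → List β}
    (h : ∀ a ∈ l, f a = g a) : l.flatMap f = l.flatMap g := by
  induction l with
  | nil => rfl
  | cons a l ih =>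
    simp only [List.flatMap_cons]
    rw [h a (by simp), ih (fun a ha => h a (by simp [ha]))]

-- a nonempty group of equal-length columns zipped is the pyRange-indexed row map
lemma zip_group_eq_rows (cols : List (List Int)) (g : Int → List Int) (n : Nat)
    (hne : cols ≠ []) (hlen : ∀ x ∈ cols, x.length = n)
    (hrow : ∀ r : Nat, r < n → cols.map (fun col => col.getD r 0) = g (r : Int)) :
    pyZipStar cols = (PySem.List.pyRange 0 (n : Int) 1).map g := by
  match cols, hne with
  | c :: cs, _ =>
    show pyZipCols c cs = _
    rw [pyZipCols_eq_rows c cs n (hlen c (by simp)) (fun x hx => hlen x (by simp [hx]))]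
    have hr : PySem.List.pyRange 0 (n : Int) 1 = List.map (fun k : Nat => (k : Int)) (List.range n) :=
      PySem.List.pyRange_zero_natCast n
    rw [hr, List.map_map]
    apply List.map_congr_left
    intro r hrn
    exact hrow r (List.mem_range.mp hrn)


-- column lists built by A's loops / row pieces built by B's loops (proof abbreviations)
def bCols (sn zn tn un : List Int) (ml N m : Int) : List (List Int) :=
  (PySem.List.pyRange 0 m 1).flatMap (fun i =>
    [PySem.List.slice sn (some (ml - 1 - i)) (some (N - 1 - i)),
     PySem.List.slice zn (some (ml - 1 - i)) (some (N - 1 - i)),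
     PySem.List.slice tn (some (ml - 1 - i)) (some (N - 1 - i)),
     PySem.List.slice un (some (ml - 1 - i)) (some (N - 1 - i))])

def yCols (yn : List Int) (ml N l : Int) : List (List Int) :=
  (PySem.List.pyRange 0 l 1).flatMap (fun i =>
    [PySem.List.slice yn (some (ml - 1 - i)) (some (N - 1 - i))])

def xCol (xn : List Int) (ml N : Int) : List (List Int) :=
  (PySem.List.pyRange 0 1 1).flatMap (fun i =>
    [PySem.List.slice xn (some (ml - i)) (some (N - i))])

def bRow (sn zn tn un : List Int) (ml m r : Int) : List Int :=
  (PySem.List.pyRange 0 m 1).flatMap (fun i =>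
    [PySem.List.pyGetD sn (ml - 1 - i + r) 0, PySem.List.pyGetD zn (ml - 1 - i + r) 0,
     PySem.List.pyGetD tn (ml - 1 - i + r) 0, PySem.List.pyGetD un (ml - 1 - i + r) 0])

def yRow (yn : List Int) (ml l r : Int) : List Int :=
  (PySem.List.pyRange 0 l 1).map (fun i => PySem.List.pyGetD yn (ml - 1 - i + r) 0)

lemma xCol_eq (xn : List Int) (ml N : Int) :
    xCol xn ml N = [PySem.List.slice xn (some ml) (some N)] := by
  simp [xCol, show PySem.List.pyRange 0 1 1 = [0] from by decide]

lemma bCols_len {sn zn tn un : List Int} {ml N m : Int}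
    (hsn : (sn.length : Int) = N) (hzn : (zn.length : Int) = N)
    (htn : (tn.length : Int) = N) (hun : (un.length : Int) = N)
    (hmml : m ≤ ml) (hmlN : ml ≤ N) :
    ∀ x ∈ bCols sn zn tn un ml N m, x.length = (N - ml).toNat := by
  intro x hx
  simp only [bCols, List.mem_flatMap] at hx
  obtain ⟨i, hi, hx⟩ := hx
  obtain ⟨h0i, him⟩ := PySem.List.mem_pyRange_one.mp hi
  simp only [List.mem_cons, List.not_mem_nil, or_false] at hx
  have hlen : ∀ (a : List Int), (a.length : Int) = N →
      (PySem.List.slice a (some (ml - 1 - i)) (some (N - 1 - i))).length = (N - ml).toNat := by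
    intro a ha
    rw [slice_length_eq a _ _ (by omega) (by omega) (by omega)]
    omega
  rcases hx with rfl | rfl | rfl | rfl
  · exact hlen sn hsn
  · exact hlen zn hzn
  · exact hlen tn htn
  · exact hlen un hun

lemma yCols_len {yn : List Int} {ml N l : Int}
    (hyn : (yn.length : Int) = N) (hlml : l ≤ ml) (hmlN : ml ≤ N) :
    ∀ x ∈ yCols yn ml N l, x.length = (N - ml).toNat := by
  intro x hx
  simp only [yCols, List.mem_flatMap] at hx
  obtain ⟨i, hi, hx⟩ := hx
  obtain ⟨h0i, hil⟩ := PySem.List.mem_pyRange_one.mp hi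
  simp only [List.mem_cons, List.not_mem_nil, or_false] at hx
  subst hx
  rw [slice_length_eq yn _ _ (by omega) (by omega) (by omega)]; omega

lemma xCol_len {xn : List Int} {ml N : Int}
    (hxn : (xn.length : Int) = N) (hml : 0 ≤ ml) (hmlN : ml ≤ N) :
    ∀ x ∈ xCol xn ml N, x.length = (N - ml).toNat := by
  intro x hx
  rw [xCol_eq] at hx
  simp only [List.mem_cons, List.not_mem_nil, or_false] at hx
  subst hx
  rw [slice_length_eq xn _ _ (by omega) (by omega) (by omega)]

lemma bRow_eq {sn zn tn un : List Int} {ml N m : Int}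
    (hsn : (sn.length : Int) = N) (hzn : (zn.length : Int) = N)
    (htn : (tn.length : Int) = N) (hun : (un.length : Int) = N)
    (hmml : m ≤ ml) (r : Nat) (hr : (r : Int) < N - ml) :
    (bCols sn zn tn un ml N m).map (fun col => col.getD r 0) = bRow sn zn tn un ml m r := by
  simp only [bCols, bRow, List.map_flatMap]
  apply flatMap_congr_mem
  intro i hi
  obtain ⟨h0i, him⟩ := PySem.List.mem_pyRange_one.mp hi
  simp only [List.map_cons, List.map_nil]
  rw [slice_getD sn _ _ r (by omega) (by omega) (by omega) (by omega),
      slice_getD zn _ _ r (by omega) (by omega) (by omega) (by omega),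
      slice_getD tn _ _ r (by omega) (by omega) (by omega) (by omega),
      slice_getD un _ _ r (by omega) (by omega) (by omega) (by omega)]

lemma yRow_eq {yn : List Int} {ml N l : Int}
    (hyn : (yn.length : Int) = N) (hlml : l ≤ ml) (r : Nat) (hr : (r : Int) < N - ml) :
    (yCols yn ml N l).map (fun col => col.getD r 0) = yRow yn ml l r := by
  simp only [yCols, yRow, List.map_flatMap, List.map_cons, List.map_nil]
  rw [← List.map_eq_flatMap]
  apply List.map_congr_left
  intro i hi
  obtain ⟨h0i, hil⟩ := PySem.List.mem_pyRange_one.mp hi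
  rw [slice_getD yn _ _ r (by omega) (by omega) (by omega) (by omega)]

lemma xCol_row {xn : List Int} {ml N : Int}
    (hxn : (xn.length : Int) = N) (hml : 0 ≤ ml) (r : Nat) (hr : (r : Int) < N - ml) :
    (xCol xn ml N).map (fun col => col.getD r 0) = [PySem.List.pyGetD xn (ml + r) 0] := by
  rw [xCol_eq]
  simp only [List.map_cons, List.map_nil]
  rw [slice_getD xn _ _ r (by omega) (by omega) (by omega) (by omega)]


lemma pyZipStar_of_mem_nil' {cols : List (List Int)} (h : [] ∈ cols) : pyZipStar cols = [] := by
  match cols, h with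
  | c :: cs, h => exact pyZipStar_of_mem_nil h

lemma bCols_ne_nil {sn zn tn un : List Int} {ml N m : Int} (hm1 : 0 < m) :
    bCols sn zn tn un ml N m ≠ [] := by
  simp [bCols, PySem.List.pyRange_one_cons hm1]

lemma yCols_ne_nil {yn : List Int} {ml N l : Int} (hl1 : 0 < l) :
    yCols yn ml N l ≠ [] := by
  simp [yCols, PySem.List.pyRange_one_cons hl1]

lemma first_slice_nil {a : List Int} {ml N : Int} (ha : (a.length : Int) = N)
    (hml : 1 ≤ ml) (_hN0 : 0 ≤ N) (hNml : N < ml) :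
    PySem.List.slice a (some (ml - 1 - 0)) (some (N - 1 - 0)) = [] := by
  by_cases hN : 0 < N
  · exact slice_eq_nil _ _ _ (by omega) (by omega) (by omega)
  · have : a = [] := List.eq_nil_of_length_eq_zero (by omega)
    rw [this]; exact slice_of_nil _ _

lemma bCols_mem_nil {sn zn tn un : List Int} {ml N m : Int}
    (hsn : (sn.length : Int) = N) (hm1 : 0 < m) (_hmml : m ≤ ml)
    (hN0 : 0 ≤ N) (hNml : N < ml) :
    [] ∈ bCols sn zn tn un ml N m := by
  refine List.mem_flatMap.mpr ⟨0, PySem.List.mem_pyRange_one.mpr ⟨le_refl 0, hm1⟩, ?_⟩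
  exact List.mem_cons.mpr (Or.inl (first_slice_nil hsn (by omega) hN0 hNml).symm)

lemma yCols_mem_nil {yn : List Int} {ml N l : Int}
    (hyn : (yn.length : Int) = N) (hl1 : 0 < l) (_hlml : l ≤ ml)
    (hN0 : 0 ≤ N) (hNml : N < ml) :
    [] ∈ yCols yn ml N l := by
  refine List.mem_flatMap.mpr ⟨0, PySem.List.mem_pyRange_one.mpr ⟨le_refl 0, hl1⟩, ?_⟩
  exact List.mem_cons.mpr (Or.inl (first_slice_nil hyn (by omega) hN0 hNml).symm)

lemma xCol_mem_nil {xn : List Int} {ml N : Int} (hml : 0 ≤ ml) (hN0 : 0 ≤ N)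
    (hNml : N ≤ ml) : [] ∈ xCol xn ml N := by
  rw [xCol_eq]
  exact List.mem_cons.mpr (Or.inl (slice_eq_nil _ _ _ hml hN0 hNml).symm)

lemma rows_nil {N ml : Int} (hNml : N < ml) :
    PySem.List.pyRange 0 (max 0 (N - ml)) 1 = [] := by
  rw [show max 0 (N - ml) = 0 from by omega]
  decide

lemma rows_cast {N ml : Int} (hNml : ml ≤ N) :
    max 0 (N - ml) = (((N - ml).toNat : Nat) : Int) := by omega

-- the four zipped groups, as B computes them
lemma eq_xm {sn zn tn un : List Int} {ml N m : Int}
    (hsn : (sn.length : Int) = N) (hzn : (zn.length : Int) = N)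
    (htn : (tn.length : Int) = N) (hun : (un.length : Int) = N)
    (hm0 : 0 ≤ m) (hmml : m ≤ ml) (hN0 : 0 ≤ N) :
    pyZipStar (bCols sn zn tn un ml N m) =
      if m > 0 then
        (PySem.List.pyRange 0 (max 0 (N - ml)) 1).map (fun r => bRow sn zn tn un ml m r)
      else [] := by
  by_cases hm1 : 0 < m
  · rw [if_pos hm1]
    by_cases hNml : ml ≤ N
    · rw [rows_cast hNml]
      refine zip_group_eq_rows _ _ ((N - ml).toNat) (bCols_ne_nil hm1)
        (bCols_len hsn hzn htn hun hmml hNml) ?_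
      intro r hr
      exact bRow_eq hsn hzn htn hun hmml r (by omega)
    · rw [rows_nil (by omega), List.map_nil]
      exact pyZipStar_of_mem_nil' (bCols_mem_nil hsn hm1 hmml hN0 (by omega))
  · rw [if_neg hm1]
    have hm : m = 0 := by omega
    subst hm
    simp [bCols, show PySem.List.pyRange 0 0 1 = [] from by decide, pyZipStar]

lemma eq_xm_yl {sn zn tn un yn : List Int} {ml N m l : Int}
    (hsn : (sn.length : Int) = N) (hzn : (zn.length : Int) = N)
    (htn : (tn.length : Int) = N) (hun : (un.length : Int) = N)
    (hyn : (yn.length : Int) = N)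
    (hm0 : 0 ≤ m) (hl0 : 0 ≤ l) (hml : ml = max m l) (hN0 : 0 ≤ N) :
    pyZipStar (bCols sn zn tn un ml N m ++ yCols yn ml N l) =
      if max m l > 0 then
        (PySem.List.pyRange 0 (max 0 (N - ml)) 1).map
          (fun r => bRow sn zn tn un ml m r ++ yRow yn ml l r)
      else [] := by
  have hmml : m ≤ ml := by omega
  have hlml : l ≤ ml := by omega
  by_cases hml1 : max m l > 0
  · rw [if_pos hml1]
    have hcase : 0 < m ∨ (m = 0 ∧ 0 < l) := by omega
    by_cases hNml : ml ≤ N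
    · rw [rows_cast hNml]
      refine zip_group_eq_rows _ _ ((N - ml).toNat) ?_ ?_ ?_
      · rcases hcase with hm1 | ⟨_, hl1⟩
        · intro h; exact bCols_ne_nil hm1 (List.append_eq_nil_iff.mp h).1
        · intro h; exact yCols_ne_nil hl1 (List.append_eq_nil_iff.mp h).2
      · intro x hx
        rcases List.mem_append.mp hx with hx | hx
        · exact bCols_len hsn hzn htn hun hmml hNml x hx
        · exact yCols_len hyn hlml hNml x hx
      · intro r hr
        rw [List.map_append, bRow_eq hsn hzn htn hun hmml r (by omega),
          yRow_eq hyn hlml r (by omega)]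
    · rw [rows_nil (by omega), List.map_nil]
      apply pyZipStar_of_mem_nil'
      rcases hcase with hm1 | ⟨_, hl1⟩
      · exact List.mem_append_left _ (bCols_mem_nil hsn hm1 hmml hN0 (by omega))
      · exact List.mem_append_right _ (yCols_mem_nil hyn hl1 hlml hN0 (by omega))
  · rw [if_neg hml1]
    have hm : m = 0 := by omega
    have hl : l = 0 := by omega
    subst hm; subst hl
    simp [bCols, yCols, show PySem.List.pyRange 0 0 1 = [] from by decide, pyZipStar]

lemma eq_xn1_xm {xn sn zn tn un : List Int} {ml N m : Int}
    (hxn : (xn.length : Int) = N)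
    (hsn : (sn.length : Int) = N) (hzn : (zn.length : Int) = N)
    (htn : (tn.length : Int) = N) (hun : (un.length : Int) = N)
    (_hm0 : 0 ≤ m) (hmml : m ≤ ml) (hml0 : 0 ≤ ml) (hN0 : 0 ≤ N) :
    pyZipStar (bCols sn zn tn un ml N m ++ xCol xn ml N) =
      (PySem.List.pyRange 0 (max 0 (N - ml)) 1).map
        (fun r => bRow sn zn tn un ml m r ++ [PySem.List.pyGetD xn (ml + r) 0]) := by
  by_cases hNml : ml ≤ N
  · rw [rows_cast hNml]
    refine zip_group_eq_rows _ _ ((N - ml).toNat)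
      (by intro h; have := (List.append_eq_nil_iff.mp h).2; rw [xCol_eq] at this; simp at this) ?_ ?_
    · intro x hx
      rcases List.mem_append.mp hx with hx | hx
      · exact bCols_len hsn hzn htn hun hmml hNml x hx
      · exact xCol_len hxn hml0 hNml x hx
    · intro r hr
      rw [List.map_append, bRow_eq hsn hzn htn hun hmml r (by omega),
        xCol_row hxn hml0 r (by omega)]
  · rw [rows_nil (by omega), List.map_nil]
    exact pyZipStar_of_mem_nil'
      (List.mem_append_right _ (xCol_mem_nil hml0 hN0 (by omega)))

lemma eq_xn1_xm_yl {xn sn zn tn un yn : List Int} {ml N m l : Int}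
    (hxn : (xn.length : Int) = N)
    (hsn : (sn.length : Int) = N) (hzn : (zn.length : Int) = N)
    (htn : (tn.length : Int) = N) (hun : (un.length : Int) = N)
    (hyn : (yn.length : Int) = N)
    (hm0 : 0 ≤ m) (_hl0 : 0 ≤ l) (hml : ml = max m l) (hN0 : 0 ≤ N) :
    pyZipStar (bCols sn zn tn un ml N m ++ yCols yn ml N l ++ xCol xn ml N) =
      (PySem.List.pyRange 0 (max 0 (N - ml)) 1).map
        (fun r => bRow sn zn tn un ml m r ++ yRow yn ml l r ++
          [PySem.List.pyGetD xn (ml + r) 0]) := by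
  have hmml : m ≤ ml := by omega
  have hlml : l ≤ ml := by omega
  have hml0 : 0 ≤ ml := by omega
  by_cases hNml : ml ≤ N
  · rw [rows_cast hNml]
    refine zip_group_eq_rows _ _ ((N - ml).toNat)
      (by intro h; have := (List.append_eq_nil_iff.mp h).2; rw [xCol_eq] at this; simp at this) ?_ ?_
    · intro x hx
      rcases List.mem_append.mp hx with hx | hx
      · rcases List.mem_append.mp hx with hx | hx
        · exact bCols_len hsn hzn htn hun hmml hNml x hx
        · exact yCols_len hyn hlml hNml x hx
      · exact xCol_len hxn hml0 hNml x hx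
    · intro r hr
      rw [List.map_append, List.map_append, bRow_eq hsn hzn htn hun hmml r (by omega),
        yRow_eq hyn hlml r (by omega), xCol_row hxn hml0 r (by omega)]
  · rw [rows_nil (by omega), List.map_nil]
    exact pyZipStar_of_mem_nil'
      (List.mem_append_right _ (xCol_mem_nil hml0 hN0 (by omega)))

-- ===== VERDICT (by name: the statement is the Claim_ definition above) =====
theorem make_externalconditional_vectors_spec : Claim_equal_make_externalconditional_vectors := by
  intro xn sn zn tn un yn m l hdom hpre
  obtain ⟨hy, hs, hz, ht, hu, hm, hl⟩ := hpre
  unfold Spec_make_externalconditional_vectors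
  simp only [make_externalconditional_vectors, make_externalconditional_vectors_alt,
    PySem.List.foldl_append_eq_flatMap, List.nil_append]
  have hN0 : (0 : Int) ≤ (xn.length : Int) := by positivity
  refine congrArg₂ Prod.mk ?_ (congrArg₂ Prod.mk ?_ (congrArg₂ Prod.mk ?_ ?_))
  · exact eq_xn1_xm_yl rfl (by exact_mod_cast congrArg Nat.cast hs.symm)
      (by exact_mod_cast congrArg Nat.cast hz.symm) (by exact_mod_cast congrArg Nat.cast ht.symm)
      (by exact_mod_cast congrArg Nat.cast hu.symm) (by exact_mod_cast congrArg Nat.cast hy.symm)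
      hm hl rfl hN0
  · exact eq_xm_yl (by exact_mod_cast congrArg Nat.cast hs.symm)
      (by exact_mod_cast congrArg Nat.cast hz.symm) (by exact_mod_cast congrArg Nat.cast ht.symm)
      (by exact_mod_cast congrArg Nat.cast hu.symm) (by exact_mod_cast congrArg Nat.cast hy.symm)
      hm hl rfl hN0
  · exact eq_xn1_xm rfl (by exact_mod_cast congrArg Nat.cast hs.symm)
      (by exact_mod_cast congrArg Nat.cast hz.symm) (by exact_mod_cast congrArg Nat.cast ht.symm)
      (by exact_mod_cast congrArg Nat.cast hu.symm) hm (le_max_left m l)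
      (by omega) hN0
  · exact eq_xm (by exact_mod_cast congrArg Nat.cast hs.symm)
      (by exact_mod_cast congrArg Nat.cast hz.symm) (by exact_mod_cast congrArg Nat.cast ht.symm)
      (by exact_mod_cast congrArg Nat.cast hu.symm) hm (le_max_left m l) hN0
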